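-- pv_equiv track=rewrite | github.com/lbellows/blog | scripts/common/post_io.py | _strip_leading_instructions
-- ===== SOURCE A (Python) =====
-- def _strip_leading_instructions(markdown_body: str) -> str:
--     lines = markdown_body.splitlines()
--     cleaned: list[str] = []
--     found_heading = False
--     for line in lines:
--         if not found_heading:
--             if line.strip().startswith("#"):
--                 found_heading = True
--                 cleaned.append(line)
--             else:
--                 # drop preamble lines (LLM instructions, etc.)
--                 continue
--         else:
--             cleaned.append(line)
--     if found_heading:
--         return "\n".join(cleaned).lstrip("\n")
--     return markdown_body.strip()
-- ===== SOURCE B (Python) =====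
-- def _strip_leading_instructions(markdown_body: str) -> str:
--     lines = markdown_body.splitlines()
--     for i, line in enumerate(lines):
--         if line.strip().startswith("#"):
--             return "\n".join(lines[i:]).lstrip("\n")
--     return markdown_body.strip()
-- ===== Notes on version B (the rewrite author's own statement) =====
-- stated objective: simpler
-- what changed: Replaces the stateful found_heading accumulation loop with a find-first-heading-index scan that joins the tail slice of the lines directly, instead of appending every kept line one by one.
import Mathlib
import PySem

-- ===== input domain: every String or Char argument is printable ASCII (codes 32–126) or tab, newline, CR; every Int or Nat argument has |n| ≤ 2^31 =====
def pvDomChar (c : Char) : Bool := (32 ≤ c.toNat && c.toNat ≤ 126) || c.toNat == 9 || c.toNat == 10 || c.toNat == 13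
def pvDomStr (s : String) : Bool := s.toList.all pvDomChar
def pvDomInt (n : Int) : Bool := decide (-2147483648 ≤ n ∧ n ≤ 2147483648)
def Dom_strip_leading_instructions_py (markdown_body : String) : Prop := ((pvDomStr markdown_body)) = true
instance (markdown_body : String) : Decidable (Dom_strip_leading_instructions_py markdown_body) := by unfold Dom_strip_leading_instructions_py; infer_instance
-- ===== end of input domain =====

-- ===== PORT A =====
-- B replaces A's stateful found_heading accumulation loop with a find-first-index-then-slice scan (objective: simpler).
-- lstripNL is a hand port of Python's s.lstrip("\n") (drop leading '\n' chars); exact for the single-char strip set.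
def lstripNL (s : String) : String := String.ofList (s.toList.dropWhile (fun c => c == '\n'))

def headingPred (line : String) : Bool := PySem.Str.startswith (PySem.Str.strip line) "#"

def strip_leading_instructions_py (markdown_body : String) : String :=
  let lines := PySem.Str.splitlines markdown_body
  let st := lines.foldl
    (fun (st : List String × Bool) line =>
      if st.2 = false then
        if headingPred line then (st.1 ++ [line], true) else st
      else (st.1 ++ [line], st.2))
    ([], false)
  if st.2 then lstripNL (PySem.Str.join "\n" st.1)
  else PySem.Str.strip markdown_body

-- ===== PORT B =====
-- transliteration of Source B: scan enumerate(lines) for the first heading, return join of the slice from its index.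
def altGo (lines : List String) : List (Int × String) → Option String
  | [] => none
  | (i, line) :: rest =>
    if headingPred line then
      some (lstripNL (PySem.Str.join "\n" (PySem.List.slice lines (some i) none)))
    else altGo lines rest

def strip_leading_instructions_py_alt (markdown_body : String) : String :=
  let lines := PySem.Str.splitlines markdown_body
  match altGo lines (PySem.List.enumerate lines 0) with
  | some s => s
  | none => PySem.Str.strip markdown_body

-- ===== PRECONDITION & SPEC =====
def Spec_strip_leading_instructions_py (markdown_body : String) (out : String) : Prop := out = strip_leading_instructions_py_alt markdown_body
instance (markdown_body : String) (out : String) : Decidable (Spec_strip_leading_instructions_py markdown_body out) := by unfold Spec_strip_leading_instructions_py; infer_instance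

-- ===== CLAIM (what is proved, stated in full; the proofs are below) =====
def Claim_equal_strip_leading_instructions_py : Prop := ∀ (markdown_body : String), Dom_strip_leading_instructions_py markdown_body → Spec_strip_leading_instructions_py markdown_body (strip_leading_instructions_py markdown_body)

-- ===== LEMMAS AND PROOFS =====

theorem foldl_found_true (l acc : List String) :
    l.foldl (fun (st : List String × Bool) line =>
      if st.2 = false then
        if headingPred line then (st.1 ++ [line], true) else st
      else (st.1 ++ [line], st.2)) (acc, true) = (acc ++ l, true) := by
  induction l generalizing acc with
  | nil => simp
  | cons x t ih => simp [List.foldl, ih]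

theorem foldl_found_false (l acc : List String) :
    l.foldl (fun (st : List String × Bool) line =>
      if st.2 = false then
        if headingPred line then (st.1 ++ [line], true) else st
      else (st.1 ++ [line], st.2)) (acc, false) =
    if l.any headingPred then (acc ++ l.dropWhile (fun x => !headingPred x), true)
    else (acc, false) := by
  induction l generalizing acc with
  | nil => simp
  | cons x t ih =>
    by_cases h : headingPred x
    · simp [List.foldl, h, foldl_found_true]
    · simp [List.foldl, h, ih]

theorem altGo_eq (lines s : List String) (k : Nat) (hk : lines.drop k = s) :
    altGo lines (PySem.List.enumerate s (k : Int)) =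
    if s.any headingPred then
      some (lstripNL (PySem.Str.join "\n" (s.dropWhile (fun x => !headingPred x))))
    else none := by
  induction s generalizing k with
  | nil => simp [PySem.List.enumerate_nil, altGo]
  | cons x t ih =>
    rw [PySem.List.enumerate_cons]
    by_cases h : headingPred x
    · simp only [altGo, h]
      rw [PySem.List.slice_from_natCast, hk]
      simp [h]
    · simp only [altGo, if_neg h]
      have hk' : lines.drop (k + 1) = t := by
        rw [← List.tail_drop, hk, List.tail_cons]
      have := ih (k + 1) hk'
      push_cast at this ⊢
      rw [this]
      simp [h]

-- ===== VERDICT (by name: the statement is the Claim_ definition above) =====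
theorem strip_leading_instructions_py_spec : Claim_equal_strip_leading_instructions_py := by
  intro markdown_body _
  unfold Spec_strip_leading_instructions_py strip_leading_instructions_py strip_leading_instructions_py_alt
  dsimp only
  rw [foldl_found_false]
  have h0 : PySem.List.enumerate (PySem.Str.splitlines markdown_body) =
      PySem.List.enumerate (PySem.Str.splitlines markdown_body) ((0 : Nat) : Int) := by norm_num
  rw [h0, altGo_eq (PySem.Str.splitlines markdown_body) (PySem.Str.splitlines markdown_body) 0 (by simp)]
  by_cases h : (PySem.Str.splitlines markdown_body).any headingPred <;> simp [h]
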